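-- pv_equiv track=rewrite | github.com/cu-compg-spring-2025/assignment-4-string-search-vincedbowen | src/naive_search.py | naive_search_shifts
-- ===== SOURCE A (Python) =====
-- def naive_search_shifts(T, P):
--     n = len(T)
--     m = len(P)
--     num_shifts = 0
--
--     for i in range(n - m + 1):
--         match = True
--         num_shifts += 1
--         for j in range(m):
--             if T[i + j] != P[j]:
--                 match = False
--                 break
--         if match:
--             pass
--
--     return num_shifts
-- ===== SOURCE B (Python) =====
-- def naive_search_shifts(T, P):
--     return max(0, len(T) - len(P) + 1)
-- ===== Notes on version B (the rewrite author's own statement) =====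
-- stated objective: simpler
-- what changed: Replaced the nested scanning loops (whose match result is discarded) by the closed form max(0, len(T)-len(P)+1), since A only counts alignment positions.
import Mathlib
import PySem

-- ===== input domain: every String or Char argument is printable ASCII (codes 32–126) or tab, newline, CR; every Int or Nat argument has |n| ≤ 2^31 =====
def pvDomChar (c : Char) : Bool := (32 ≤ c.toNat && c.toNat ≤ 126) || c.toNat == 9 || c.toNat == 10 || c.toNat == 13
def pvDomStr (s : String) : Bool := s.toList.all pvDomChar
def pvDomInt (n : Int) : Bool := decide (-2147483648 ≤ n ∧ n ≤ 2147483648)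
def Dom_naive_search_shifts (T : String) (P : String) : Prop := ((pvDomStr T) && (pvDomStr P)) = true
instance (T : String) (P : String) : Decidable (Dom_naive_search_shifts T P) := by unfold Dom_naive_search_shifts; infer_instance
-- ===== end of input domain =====

-- B replaces A's nested scanning loops (whose match result is discarded) by the closed form max(0, len(T)-len(P)+1): simpler.


-- ===== PORT A =====
-- inner 'for j in range(m)' loop with its break, threading the 'match' flag
def pvInnerA (T : String) (P : String) (i : Int) : List Int → Bool → Bool
  | [], m => m
  | j :: rest, m =>
    if PySem.Str.pyGet? T (i + j) ≠ PySem.Str.pyGet? P j then false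
    else pvInnerA T P i rest m

def naive_search_shifts (T : String) (P : String) : Int :=
  let n := PySem.Str.len T
  let m := PySem.Str.len P
  (PySem.List.pyRange 0 (n - m + 1) 1).foldl (fun num_shifts i =>
    let mtch := true
    let num_shifts := num_shifts + 1
    let mtch := pvInnerA T P i (PySem.List.pyRange 0 m 1) mtch
    let _ := mtch   -- 'if match: pass'
    num_shifts) 0

-- ===== PORT B =====
def naive_search_shifts_alt (T : String) (P : String) : Int :=
  max 0 (PySem.Str.len T - PySem.Str.len P + 1)

-- ===== PRECONDITION & SPEC =====
def Spec_naive_search_shifts (T : String) (P : String) (out : Int) : Prop := out = naive_search_shifts_alt T P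
instance (T : String) (P : String) (out : Int) : Decidable (Spec_naive_search_shifts T P out) := by unfold Spec_naive_search_shifts; infer_instance

-- ===== CLAIM (what is proved, stated in full; the proofs are below) =====
def Claim_equal_naive_search_shifts : Prop := ∀ (T : String) (P : String), Dom_naive_search_shifts T P → Spec_naive_search_shifts T P (naive_search_shifts T P)

-- ===== LEMMAS AND PROOFS =====
theorem pv_foldl_count (g : Int → Bool) (l : List Int) (c : Int) :
    l.foldl (fun s i => let _ := g i; s + 1) c = c + l.length := by
  induction l generalizing c with
  | nil => simp
  | cons x xs ih => simp [List.foldl, ih]; ring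

-- ===== VERDICT (by name: the statement is the Claim_ definition above) =====
theorem naive_search_shifts_spec : Claim_equal_naive_search_shifts := by
  intro T P _
  unfold Spec_naive_search_shifts naive_search_shifts naive_search_shifts_alt
  simp only []
  rw [show (fun (num_shifts : Int) (i : Int) =>
        let mtch := true
        let num_shifts := num_shifts + 1
        let mtch := pvInnerA T P i (PySem.List.pyRange 0 (PySem.Str.len P) 1) mtch
        let _ := mtch
        num_shifts)
      = (fun (s : Int) (i : Int) =>
        let _ := pvInnerA T P i (PySem.List.pyRange 0 (PySem.Str.len P) 1) true
        s + 1) from rfl]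
  rw [pv_foldl_count (fun i => pvInnerA T P i (PySem.List.pyRange 0 (PySem.Str.len P) 1) true)]
  rw [PySem.List.length_pyRange_one]
  omega
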